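-- pv_equiv track=rewrite | github.com/nanma80/zomeable-4polytopes | tools/rescale_corpus.py | _rescale_point_attr
-- ===== SOURCE A (Python) =====
-- def mul_phi(a: int, b: int) -> tuple[int, int]:
--     """(a + b*phi) * phi = a*phi + b*phi^2 = a*phi + b*(phi+1) = b + (a+b)*phi."""
--     return (b, a + b)
--
-- def mul_phi_inv(a: int, b: int) -> tuple[int, int]:
--     """1/phi = phi - 1, so (a + b*phi) * (phi - 1) = (a + b*phi)*phi - (a + b*phi)
--     = (b + (a+b)*phi) - (a + b*phi) = (b - a) + a*phi.  But that is (a + b*phi)/phi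
--     so the integer answer is ((b - a), a).  Wait check sign: 1/phi ≈ 0.618.
--     (1, 0)/phi = 0.618 = -1 + phi, i.e. (-1, 1).  Try (b - a, a): (0 - 1, 1) = (-1, 1). ✓
--     (0, 1)/phi = 1, i.e. (1, 0).  Try (b - a, a): (1 - 0, 0) = (1, 0). ✓
--     """
--     return (b - a, a)
--
-- def mul_phi_pow(a: int, b: int, k: int) -> tuple[int, int]:
--     """Multiply (a + b*phi) by phi^k, returning the resulting (a', b')."""
--     if k == 0:
--         return (a, b)
--     if k > 0:
--         for _ in range(k):
--             a, b = mul_phi(a, b)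
--     else:
--         for _ in range(-k):
--             a, b = mul_phi_inv(a, b)
--     return (a, b)
--
-- def _rescale_point_attr(point_str: str, k: int) -> str:
--     parts = point_str.strip().split()
--     if len(parts) != 6:
--         # Not a 6-int coord (some attributes share the name in vZome XML
--         # but carry other things, e.g. start/end on non-coord elements).
--         # Leave untouched.
--         return point_str
--     try:
--         nums = [int(p) for p in parts]
--     except ValueError:
--         return point_str
--     out = []
--     for i in range(0, 6, 2):
--         a, b = nums[i], nums[i + 1]
--         a2, b2 = mul_phi_pow(a, b, k)
--         out.append(str(a2))
--         out.append(str(b2))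
--     return " ".join(out)
-- ===== SOURCE B (Python) =====
-- def _fib_pair(n: int) -> tuple[int, int]:
--     """(F(n), F(n+1)) by fast doubling: O(log n) multiplications."""
--     if n == 0:
--         return (0, 1)
--     f, g = _fib_pair(n // 2)
--     c = f * (2 * g - f)
--     d = f * f + g * g
--     if n % 2 == 1:
--         return (d, c + d)
--     return (c, d)
--
-- def _rescale_point_attr(point_str: str, k: int) -> str:
--     parts = point_str.strip().split()
--     if len(parts) != 6:
--         return point_str
--     try:
--         nums = [int(p) for p in parts]
--     except ValueError:
--         return point_str
--     f, g = _fib_pair(abs(k))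
--     # phi^k = c0 + c1*phi with c0 = F(k-1), c1 = F(k); F(-n) = (-1)**(n+1) * F(n)
--     if k >= 0:
--         c0, c1 = g - f, f
--     elif k % 2 == 0:
--         c0, c1 = g, -f
--     else:
--         c0, c1 = -g, f
--     c2 = c0 + c1
--     x0, y0, x1, y1, x2, y2 = nums
--     return " ".join(str(v) for v in (
--         x0 * c0 + y0 * c1, x0 * c1 + y0 * c2,
--         x1 * c0 + y1 * c1, x1 * c1 + y1 * c2,
--         x2 * c0 + y2 * c1, x2 * c1 + y2 * c2))
-- ===== Notes on version B (the rewrite author's own statement) =====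
-- stated objective: faster
-- what changed: Replaces the O(|k|) repeated phi / 1-phi multiplication loop (run once per coordinate pair) with one O(log|k|) fast-doubling Fibonacci computation of the coefficients of phi^k, applied to all three pairs.
import Mathlib
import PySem

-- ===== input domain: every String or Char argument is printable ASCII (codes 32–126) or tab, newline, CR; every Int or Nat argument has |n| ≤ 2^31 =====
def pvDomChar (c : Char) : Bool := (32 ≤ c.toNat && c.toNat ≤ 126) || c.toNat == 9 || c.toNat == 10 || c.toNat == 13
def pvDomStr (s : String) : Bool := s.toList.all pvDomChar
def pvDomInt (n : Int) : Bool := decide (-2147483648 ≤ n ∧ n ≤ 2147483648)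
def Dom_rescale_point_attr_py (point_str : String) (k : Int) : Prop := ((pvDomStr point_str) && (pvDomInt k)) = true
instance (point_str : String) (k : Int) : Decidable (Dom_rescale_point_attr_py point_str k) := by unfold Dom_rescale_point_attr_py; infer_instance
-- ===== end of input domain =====

-- B replaces A's O(|k|) iterate-phi loop (run per coordinate pair) by one O(log|k|)
-- fast-doubling Fibonacci computation of the coefficients of phi^k.

-- ===== PORT A =====
def mul_phi (a b : Int) : Int × Int := (b, a + b)

def mul_phi_inv (a b : Int) : Int × Int := (b - a, a)

def mul_phi_pow (a b k : Int) : Int × Int :=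
  if k = 0 then (a, b)
  else if k > 0 then
    (PySem.List.pyRange 0 k 1).foldl (fun (p : Int × Int) _ => mul_phi p.1 p.2) (a, b)
  else
    (PySem.List.pyRange 0 (-k) 1).foldl (fun (p : Int × Int) _ => mul_phi_inv p.1 p.2) (a, b)

def rescale_point_attr_py (point_str : String) (k : Int) : String :=
  let parts := PySem.Str.split₀ (PySem.Str.strip point_str)
  if parts.length ≠ 6 then point_str
  else
    match parts.mapM PySem.Int.ofStr? with
    | none => point_str
    | some nums =>
      let out := (PySem.List.pyRange 0 6 2).foldl (fun (out : List String) i =>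
        let a := PySem.List.pyGetD nums i 0
        let b := PySem.List.pyGetD nums (i + 1) 0
        let p := mul_phi_pow a b k
        out ++ [PySem.Int.toStr p.1] ++ [PySem.Int.toStr p.2]) []
      PySem.Str.join " " out

-- ===== PORT B =====
def fib_pair : Nat → Int × Int
  | 0 => (0, 1)
  | (n + 1) =>
    let p := fib_pair ((n + 1) / 2)
    let f := p.1
    let g := p.2
    let c := f * (2 * g - f)
    let d := f * f + g * g
    if (n + 1) % 2 == 1 then (d, c + d) else (c, d)
decreasing_by exact Nat.div_lt_self (Nat.succ_pos n) (by norm_num)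

def rescale_point_attr_py_alt (point_str : String) (k : Int) : String :=
  let parts := PySem.Str.split₀ (PySem.Str.strip point_str)
  if parts.length ≠ 6 then point_str
  else
    match parts.mapM PySem.Int.ofStr? with
    | some [x0, y0, x1, y1, x2, y2] =>
      let fg := fib_pair k.natAbs
      let f := fg.1
      let g := fg.2
      let c01 : Int × Int :=
        if k ≥ 0 then (g - f, f)
        else if PySem.Int.mod k 2 == 0 then (g, -f)
        else (-g, f)
      let c0 := c01.1
      let c1 := c01.2
      let c2 := c0 + c1
      PySem.Str.join " "
        [PySem.Int.toStr (x0 * c0 + y0 * c1), PySem.Int.toStr (x0 * c1 + y0 * c2),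
         PySem.Int.toStr (x1 * c0 + y1 * c1), PySem.Int.toStr (x1 * c1 + y1 * c2),
         PySem.Int.toStr (x2 * c0 + y2 * c1), PySem.Int.toStr (x2 * c1 + y2 * c2)]
    | _ => point_str

-- ===== PRECONDITION & SPEC =====
def Spec_rescale_point_attr_py (point_str : String) (k : Int) (out : String) : Prop := out = rescale_point_attr_py_alt point_str k
instance (point_str : String) (k : Int) (out : String) : Decidable (Spec_rescale_point_attr_py point_str k out) := by unfold Spec_rescale_point_attr_py; infer_instance

-- ===== CLAIM (what is proved, stated in full; the proofs are below) =====
def Claim_equal_rescale_point_attr_py : Prop := ∀ (point_str : String) (k : Int), Dom_rescale_point_attr_py point_str k → Spec_rescale_point_attr_py point_str k (rescale_point_attr_py point_str k)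

-- ===== LEMMAS AND PROOFS =====

-- fast doubling computes Fibonacci pairs
theorem fib_pair_eq (n : Nat) : fib_pair n = ((Nat.fib n : Int), (Nat.fib (n + 1) : Int)) := by
  induction n using Nat.strong_induction_on with
  | _ n ih =>
    match n with
    | 0 => rw [fib_pair]; rfl
    | (m + 1) =>
      rw [fib_pair]
      have hlt : (m + 1) / 2 < m + 1 := Nat.div_lt_self (Nat.succ_pos m) (by norm_num)
      rw [ih _ hlt]
      set q := (m + 1) / 2 with hq
      have hle2 : Nat.fib q ≤ 2 * Nat.fib (q + 1) := le_trans Nat.fib_le_fib_succ (by omega)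
      rcases Nat.mod_two_eq_zero_or_one (m + 1) with hpar | hpar
      · have h2 : m + 1 = 2 * q := by omega
        rw [hpar, if_neg (by decide)]
        refine Prod.ext ?_ ?_ <;> simp only []
        · show (Nat.fib q : Int) * (2 * Nat.fib (q + 1) - Nat.fib q) = (Nat.fib (m + 1) : Int)
          rw [h2, Nat.fib_two_mul, Nat.cast_mul, Nat.cast_sub hle2]
          push_cast; ring
        · show (Nat.fib q : Int) * Nat.fib q + (Nat.fib (q + 1) : Int) * Nat.fib (q + 1) = (Nat.fib (m + 1 + 1) : Int)
          rw [show m + 1 + 1 = 2 * q + 1 by omega, Nat.fib_two_mul_add_one]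
          push_cast; ring
      · have h2 : m + 1 = 2 * q + 1 := by omega
        rw [hpar, if_pos (by decide)]
        refine Prod.ext ?_ ?_ <;> simp only []
        · show (Nat.fib q : Int) * Nat.fib q + (Nat.fib (q + 1) : Int) * Nat.fib (q + 1) = (Nat.fib (m + 1) : Int)
          rw [h2, Nat.fib_two_mul_add_one]
          push_cast; ring
        · show (Nat.fib q : Int) * (2 * Nat.fib (q + 1) - Nat.fib q) + ((Nat.fib q : Int) * Nat.fib q + (Nat.fib (q + 1) : Int) * Nat.fib (q + 1)) = (Nat.fib (m + 1 + 1) : Int)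
          rw [show m + 1 + 1 = 2 * q + 2 by omega, show 2 * q + 2 = 2 * q + 2 from rfl, Nat.fib_add_two, Nat.fib_two_mul, Nat.fib_two_mul_add_one, Nat.cast_add, Nat.cast_mul, Nat.cast_sub hle2]
          push_cast; ring

-- closed form for the positive loop
theorem foldl_mul_phi (n : Nat) (a b : Int) :
    (List.range n).foldl (fun (p : Int × Int) _ => mul_phi p.1 p.2) (a, b) =
      (a * ((Nat.fib (n + 1) : Int) - Nat.fib n) + b * Nat.fib n,
       a * Nat.fib n + b * Nat.fib (n + 1)) := by
  induction n with
  | zero => simp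
  | succ m ih =>
    rw [List.range_succ, List.foldl_append, ih]
    simp only [List.foldl_cons, List.foldl_nil, mul_phi, Nat.fib_add_two]
    push_cast
    refine Prod.ext ?_ ?_ <;> simp
    ring

-- closed form for the negative loop
theorem foldl_mul_phi_inv (n : Nat) (a b : Int) :
    (List.range n).foldl (fun (p : Int × Int) _ => mul_phi_inv p.1 p.2) (a, b) =
      ((-1) ^ n * (a * Nat.fib (n + 1) - b * Nat.fib n),
       (-1) ^ n * (b * ((Nat.fib (n + 1) : Int) - Nat.fib n) - a * Nat.fib n)) := by
  induction n with
  | zero => simp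
  | succ m ih =>
    rw [List.range_succ, List.foldl_append, ih]
    simp only [List.foldl_cons, List.foldl_nil, mul_phi_inv, Nat.fib_add_two]
    push_cast
    refine Prod.ext ?_ ?_ <;> simp <;> try ring

theorem mul_phi_pow_eq (a b k : Int) :
    mul_phi_pow a b k =
      (let fg := fib_pair k.natAbs
       let c01 : Int × Int :=
         if k ≥ 0 then (fg.2 - fg.1, fg.1)
         else if PySem.Int.mod k 2 == 0 then (fg.2, -fg.1)
         else (-fg.2, fg.1)
       (a * c01.1 + b * c01.2, a * c01.2 + b * (c01.1 + c01.2))) := by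
  rcases lt_trichotomy k 0 with hk | hk | hk
  · -- k < 0
    rw [mul_phi_pow, if_neg (by omega), if_neg (by omega)]
    have hn : (-k).toNat = k.natAbs := by omega
    rw [PySem.List.pyRange_one]
    simp only [sub_zero, hn, List.foldl_map]
    rw [foldl_mul_phi_inv]
    simp only [fib_pair_eq, if_neg (show ¬ k ≥ 0 by omega)]
    have hm : (PySem.Int.mod k 2 == 0) = decide (k.natAbs % 2 = 0) := by
      simp only [PySem.Int.mod, Int.fmod_eq_emod]
      simp only [show ((0:Int) ≤ 2 ∨ (2:Int) ∣ k) = True by simp, if_true, add_zero,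
        show ∀ x : Int, (x == 0) = decide (x = 0) from fun x => rfl, decide_eq_decide]
      omega
    rw [hm]
    by_cases hp : k.natAbs % 2 = 0
    · have he : ((-1 : Int)) ^ k.natAbs = 1 := Even.neg_one_pow (Nat.even_iff.mpr hp)
      simp only [hp, decide_true, if_pos, he]
      refine Prod.ext ?_ ?_ <;> simp <;> ring
    · have he : ((-1 : Int)) ^ k.natAbs = -1 := Odd.neg_one_pow (Nat.odd_iff.mpr (by omega))
      simp only [hp, decide_false, Bool.false_eq_true, if_false, he]
      refine Prod.ext ?_ ?_ <;> simp <;> ring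
  · -- k = 0
    subst hk
    rw [mul_phi_pow, if_pos rfl]
    simp only [Int.natAbs_zero]
    rw [fib_pair]
    norm_num
  · -- k > 0
    rw [mul_phi_pow, if_neg (by omega), if_pos hk]
    have hn : k.toNat = k.natAbs := by omega
    rw [PySem.List.pyRange_one]
    simp only [sub_zero, hn, List.foldl_map]
    rw [foldl_mul_phi]
    simp only [fib_pair_eq, if_pos (show k ≥ 0 by omega)]
    refine Prod.ext ?_ ?_ <;> simp

theorem mapM_length {α β : Type} (f : α → Option β) :
    ∀ (xs : List α) (ys : List β), xs.mapM f = some ys → ys.length = xs.length := by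
  intro xs
  induction xs with
  | nil => intro ys h; simp only [List.mapM_nil, Option.pure_def, Option.some.injEq] at h; subst h; rfl
  | cons x xs ih =>
    intro ys h
    rw [List.mapM_cons] at h
    cases hx : f x with
    | none => simp [hx] at h
    | some v =>
      simp [hx] at h
      cases ht : xs.mapM f with
      | none => simp [ht] at h
      | some t => simp [ht] at h; simp [← h, ih t ht]

-- ===== VERDICT (by name: the statement is the Claim_ definition above) =====
theorem rescale_point_attr_py_spec : Claim_equal_rescale_point_attr_py := by
  intro s k _
  unfold Spec_rescale_point_attr_py rescale_point_attr_py rescale_point_attr_py_alt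
  by_cases h6 : (PySem.Str.split₀ (PySem.Str.strip s)).length ≠ 6
  · rw [if_pos h6, if_pos h6]
  · rw [if_neg h6, if_neg h6]
    cases hm : (PySem.Str.split₀ (PySem.Str.strip s)).mapM PySem.Int.ofStr? with
    | none => rfl
    | some nums =>
      have hlen : nums.length = 6 := by
        rw [mapM_length _ _ nums hm]; omega
      match nums, hlen with
      | [n0, n1, n2, n3, n4, n5], _ =>
        simp only []
        rw [show PySem.List.pyRange 0 6 2 = [0, 2, 4] by decide]
        simp only [List.foldl_cons, List.foldl_nil, List.nil_append, List.append_assoc,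
          List.singleton_append]
        rw [show PySem.List.pyGetD [n0, n1, n2, n3, n4, n5] 0 0 = n0 from rfl,
            show PySem.List.pyGetD [n0, n1, n2, n3, n4, n5] (0 + 1) 0 = n1 from rfl,
            show PySem.List.pyGetD [n0, n1, n2, n3, n4, n5] 2 0 = n2 from rfl,
            show PySem.List.pyGetD [n0, n1, n2, n3, n4, n5] (2 + 1) 0 = n3 from rfl,
            show PySem.List.pyGetD [n0, n1, n2, n3, n4, n5] 4 0 = n4 from rfl,
            show PySem.List.pyGetD [n0, n1, n2, n3, n4, n5] (4 + 1) 0 = n5 from rfl]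
        rw [mul_phi_pow_eq n0 n1 k, mul_phi_pow_eq n2 n3 k, mul_phi_pow_eq n4 n5 k]
        rfl
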